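-- pv_equiv track=rewrite | github.com/dropseed/plain | plain-admin/plain/admin/views/objects.py | get_field_label
-- ===== SOURCE A (Python) =====
-- def get_field_label(field: str) -> str:
--     """Convert snake_case field names to human-readable labels.
--
--     Handles:
--     - Double underscore notation for lookups (e.g., created_at__date -> Created At)
--     - Dot notation for related fields (e.g., user.email -> User Email)
--     - Snake_case to Title Case conversion
--     """
--     # Handle double underscore notation for related fields (e.g., created_at__date)
--     if "__" in field:
--         parts = field.split("__")
--         # Only take the first part for display
--         field = parts[0]
--
--     # Handle dot notation for related fields
--     if "." in field:
--         parts = field.split(".")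
--         return " ".join(get_field_label(part) for part in parts)
--
--     # Convert snake_case to Title Case
--     return field.replace("_", " ").title()
-- ===== SOURCE B (Python) =====
-- def get_field_label(field: str) -> str:
--     head = field.split("__")[0]
--     return " ".join(p.replace("_", " ").title() for p in head.split("."))
-- ===== Notes on version B (the rewrite author's own statement) =====
-- stated objective: simpler
-- what changed: Replaces A's branch-guarded truncation and recursive dot handling with a flat non-recursive pipeline: unconditionally keep the text before the first double underscore and join the titled dot-parts in one comprehension (valid because the kept head contains no double underscore and dot-parts contain no dot).
import Mathlib
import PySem

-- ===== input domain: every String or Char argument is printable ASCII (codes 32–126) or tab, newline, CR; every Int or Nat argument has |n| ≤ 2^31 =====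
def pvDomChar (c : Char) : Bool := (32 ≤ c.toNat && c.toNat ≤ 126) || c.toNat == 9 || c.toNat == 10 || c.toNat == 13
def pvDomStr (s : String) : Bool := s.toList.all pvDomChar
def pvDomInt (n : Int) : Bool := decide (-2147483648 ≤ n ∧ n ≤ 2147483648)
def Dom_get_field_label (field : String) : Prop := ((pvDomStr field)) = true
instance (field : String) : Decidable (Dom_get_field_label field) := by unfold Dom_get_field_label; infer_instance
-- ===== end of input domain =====

-- B is simpler: A's conditional '__'-truncation and recursive dot handling are replaced by an
-- unconditional split('__')[0] and one flat join over the titled dot-parts (no recursion).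

-- Python's str.title() on the ASCII domain: an alphabetic char is uppercased when the previous
-- char is not alphabetic, lowercased otherwise. Hand-ported (PySem has no title); used by both ports.
def pvTitleGo : List Char → Bool → List Char
  | [], _ => []
  | c :: rest, prev =>
    if PySem.Chars.isalpha c then
      (if prev then PySem.Chars.lowerChar c else PySem.Chars.upperChar c) :: pvTitleGo rest true
    else c :: pvTitleGo rest false

def pvTitle (s : String) : String := String.ofList (pvTitleGo s.toList false)

-- ===== PORT A =====
-- fuel only makes A's recursion structural; the initial fuel (length+1) is never exhausted.
def getFieldLabelGoA : Nat → String → String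
  | 0, _ => ""
  | fuel+1, field =>
    let field1 := if PySem.Str.isIn "__" field then
        String.ofList (PySem.Chars.splitOn field.toList "__".toList).headI
      else field
    if PySem.Str.isIn "." field1 then
      PySem.Str.join " " ((PySem.Chars.splitOn field1.toList ".".toList).map
        (fun p => getFieldLabelGoA fuel (String.ofList p)))
    else pvTitle (PySem.Str.replace field1 "_" " ")

def get_field_label (field : String) : String :=
  getFieldLabelGoA (field.toList.length + 1) field

-- ===== PORT B =====
def get_field_label_alt (field : String) : String :=
  let head := String.ofList (PySem.Chars.splitOn field.toList "__".toList).headI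
  PySem.Str.join " " ((PySem.Chars.splitOn head.toList ".".toList).map
    (fun p => pvTitle (PySem.Str.replace (String.ofList p) "_" " ")))

-- ===== PRECONDITION & SPEC =====
def Spec_get_field_label (field : String) (out : String) : Prop := out = get_field_label_alt field
instance (field : String) (out : String) : Decidable (Spec_get_field_label field out) := by unfold Spec_get_field_label; infer_instance

-- ===== CLAIM (what is proved, stated in full; the proofs are below) =====
def Claim_equal_get_field_label : Prop := ∀ (field : String), Dom_get_field_label field → Spec_get_field_label field (get_field_label field)

-- ===== LEMMAS AND PROOFS =====

theorem go_mem_infix {sep : List Char} (hsep : sep ≠ []) (fuel : Nat) (l cur : List Char)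
    (acc : List (List Char)) (hf : l.length < fuel) (p : List Char)
    (hp : p ∈ PySem.Chars.splitOn.go sep fuel l cur acc) :
    p ∈ acc ∨ p <:+: (cur.reverse ++ l) := by
  induction fuel generalizing l cur acc with
  | zero => omega
  | succ fuel ih =>
    cases l with
    | nil =>
      have : PySem.Chars.splitOn.go sep (fuel+1) [] cur acc = (cur.reverse :: acc).reverse := rfl
      rw [this] at hp
      simp at hp
      rcases hp with h | h
      · exact Or.inl h
      · subst h; exact Or.inr (by simp)
    | cons c rest =>
      have heq : PySem.Chars.splitOn.go sep (fuel+1) (c::rest) cur acc =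
          if sep.isPrefixOf (c::rest) then PySem.Chars.splitOn.go sep fuel (List.drop sep.length (c::rest)) [] (cur.reverse :: acc)
          else PySem.Chars.splitOn.go sep fuel rest (c :: cur) acc := rfl
      rw [heq] at hp
      split at hp
      · have hlen : (List.drop sep.length (c::rest)).length < fuel := by
          have : 0 < sep.length := List.length_pos_iff.mpr hsep
          simp [List.length_drop] at *
          omega
        rcases ih (List.drop sep.length (c::rest)) [] (cur.reverse :: acc) hlen hp with h | h
        · rcases List.mem_cons.mp h with h | h
          · subst h; exact Or.inr (List.prefix_append _ _).isInfix
          · exact Or.inl h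
        · simp only [List.reverse_nil, List.nil_append] at h
          exact Or.inr (h.trans ((List.drop_suffix _ _).isInfix.trans (List.suffix_append _ _).isInfix))
      · have := ih rest (c :: cur) acc (by simpa using Nat.lt_of_succ_lt_succ hf) hp
        simpa [List.append_assoc] using this

theorem go_no_sep {sep : List Char} (hsep : sep ≠ []) (fuel : Nat) (l cur : List Char)
    (acc : List (List Char)) (hf : l.length < fuel)
    (hcur : ∀ t, t <:+ cur.reverse → t ≠ [] → ¬ sep <+: (t ++ l)) (p : List Char)
    (hp : p ∈ PySem.Chars.splitOn.go sep fuel l cur acc) :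
    p ∈ acc ∨ ¬ sep <:+: p := by
  induction fuel generalizing l cur acc with
  | zero => omega
  | succ fuel ih =>
    have noinf : ¬ sep <:+: cur.reverse := by
      intro hinf
      obtain ⟨t, hpre, hsuf⟩ := List.infix_iff_prefix_suffix.mp hinf
      have htne : t ≠ [] := by
        intro h; subst h; exact hsep (List.prefix_nil.mp hpre)
      exact hcur t hsuf htne (hpre.trans (List.prefix_append t l))
    cases l with
    | nil =>
      have : PySem.Chars.splitOn.go sep (fuel+1) [] cur acc = (cur.reverse :: acc).reverse := rfl
      rw [this] at hp
      simp at hp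
      rcases hp with h | h
      · exact Or.inl h
      · subst h; exact Or.inr noinf
    | cons c rest =>
      have heq : PySem.Chars.splitOn.go sep (fuel+1) (c::rest) cur acc =
          if sep.isPrefixOf (c::rest) then PySem.Chars.splitOn.go sep fuel (List.drop sep.length (c::rest)) [] (cur.reverse :: acc)
          else PySem.Chars.splitOn.go sep fuel rest (c :: cur) acc := rfl
      rw [heq] at hp
      split at hp
      · have hlen : (List.drop sep.length (c::rest)).length < fuel := by
          have : 0 < sep.length := List.length_pos_iff.mpr hsep
          simp [List.length_drop] at *
          omega
        have hcur' : ∀ t, t <:+ ([] : List Char).reverse → t ≠ [] → ¬ sep <+: (t ++ List.drop sep.length (c::rest)) := by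
          intro t ht htne
          simp only [List.reverse_nil] at ht
          exact absurd (List.suffix_nil.mp ht) htne
        rcases ih (List.drop sep.length (c::rest)) [] (cur.reverse :: acc) hlen hcur' hp with h | h
        · rcases List.mem_cons.mp h with h | h
          · subst h; exact Or.inr noinf
          · exact Or.inl h
        · exact Or.inr h
      · rename_i hnpre
        have hcur' : ∀ t, t <:+ (c :: cur).reverse → t ≠ [] → ¬ sep <+: (t ++ rest) := by
          intro t ht htne
          rcases t.eq_nil_or_concat with rfl | ⟨t', a, rfl⟩
          · exact absurd rfl htne
          · simp only [List.reverse_cons] at ht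
            obtain ⟨u, hu⟩ := ht
            have h2 : (u ++ t') ++ [a] = cur.reverse ++ [c] := by
              simpa [List.append_assoc] using hu
            obtain ⟨h3, h4⟩ := List.append_inj' h2 (by simp)
            have hac : a = c := by simpa using h4
            subst hac
            by_cases h5 : t' = []
            · subst h5
              intro hpre
              exact hnpre (List.isPrefixOf_iff_prefix.mpr (by simpa using hpre))
            · have ht' : t' <:+ cur.reverse := ⟨u, h3⟩
              have := hcur t' ht' h5
              simpa [List.append_assoc] using this
        exact ih rest (c :: cur) acc (by simpa using Nat.lt_of_succ_lt_succ hf) hcur' hp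

theorem go_of_not_infix {sep : List Char} (fuel : Nat) (l cur : List Char)
    (acc : List (List Char)) (hf : l.length < fuel)
    (h : ¬ sep <:+: (cur.reverse ++ l)) :
    PySem.Chars.splitOn.go sep fuel l cur acc = ((cur.reverse ++ l) :: acc).reverse := by
  induction fuel generalizing l cur acc with
  | zero => omega
  | succ fuel ih =>
    cases l with
    | nil => rw [List.append_nil]; rfl
    | cons c rest =>
      have heq : PySem.Chars.splitOn.go sep (fuel+1) (c::rest) cur acc =
          if sep.isPrefixOf (c::rest) then PySem.Chars.splitOn.go sep fuel (List.drop sep.length (c::rest)) [] (cur.reverse :: acc)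
          else PySem.Chars.splitOn.go sep fuel rest (c :: cur) acc := rfl
      rw [heq]
      have hnpre : ¬ sep.isPrefixOf (c::rest) = true := by
        intro hpre
        exact h (List.infix_iff_prefix_suffix.mpr
          ⟨c :: rest, List.isPrefixOf_iff_prefix.mp hpre, List.suffix_append cur.reverse (c::rest)⟩)
      rw [if_neg hnpre,
        ih rest (c :: cur) acc (by simpa using Nat.lt_of_succ_lt_succ hf)
          (by simpa [List.append_assoc] using h)]
      simp

theorem go_ne_nil {sep : List Char} (fuel : Nat) (l cur : List Char)
    (acc : List (List Char)) :
    PySem.Chars.splitOn.go sep fuel l cur acc ≠ [] := by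
  induction fuel generalizing l cur acc with
  | zero =>
    have : PySem.Chars.splitOn.go sep 0 l cur acc = ((cur.reverse ++ l) :: acc).reverse := rfl
    simp [this]
  | succ fuel ih =>
    cases l with
    | nil =>
      have : PySem.Chars.splitOn.go sep (fuel+1) [] cur acc = (cur.reverse :: acc).reverse := rfl
      simp [this]
    | cons c rest =>
      have heq : PySem.Chars.splitOn.go sep (fuel+1) (c::rest) cur acc =
          if sep.isPrefixOf (c::rest) then PySem.Chars.splitOn.go sep fuel (List.drop sep.length (c::rest)) [] (cur.reverse :: acc)
          else PySem.Chars.splitOn.go sep fuel rest (c :: cur) acc := rfl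
      rw [heq]; split
      · exact ih _ _ _
      · exact ih _ _ _

theorem splitOn_ne_nil (cs sep : List Char) : PySem.Chars.splitOn cs sep ≠ [] :=
  go_ne_nil _ _ _ _

theorem splitOn_mem_infix {cs sep p : List Char} (hsep : sep ≠ [])
    (hp : p ∈ PySem.Chars.splitOn cs sep) : p <:+: cs := by
  have := go_mem_infix hsep (cs.length + 1) cs [] [] (by omega) p hp
  simpa using this

theorem splitOn_no_sep {cs sep : List Char} (hsep : sep ≠ []) (p : List Char)
    (hp : p ∈ PySem.Chars.splitOn cs sep) : ¬ sep <:+: p := by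
  have := go_no_sep hsep (cs.length + 1) cs [] [] (by omega)
    (by intro t ht htne; simp only [List.reverse_nil] at ht; exact absurd (List.suffix_nil.mp ht) htne)
    p hp
  simpa using this

theorem splitOn_of_not_infix {cs sep : List Char} (h : ¬ sep <:+: cs) :
    PySem.Chars.splitOn cs sep = [cs] := by
  have := go_of_not_infix (cs.length + 1) cs [] [] (by omega) (by simpa using h)
  simpa [PySem.Chars.splitOn] using this

theorem headI_mem_splitOn (cs sep : List Char) :
    (PySem.Chars.splitOn cs sep).headI ∈ PySem.Chars.splitOn cs sep := by
  cases h : PySem.Chars.splitOn cs sep with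
  | nil => exact absurd h (splitOn_ne_nil cs sep)
  | cons x xs => simp

theorem goA_base (p : List Char) (fuel : Nat)
    (h2 : ¬ (['_','_'] <:+: p)) (h3 : ¬ (['.'] <:+: p)) :
    getFieldLabelGoA (fuel+1) (String.ofList p) = pvTitle (PySem.Str.replace (String.ofList p) "_" " ") := by
  have hc2 : PySem.Chars.isIn ['_','_'] p = false := (PySem.Chars.isIn_eq_false_iff _ _).mpr h2
  have hc3 : PySem.Chars.isIn ['.'] p = false := (PySem.Chars.isIn_eq_false_iff _ _).mpr h3
  simp [getFieldLabelGoA, PySem.Str.isIn, hc2, hc3]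

theorem main_eq (field : String) : get_field_label field = get_field_label_alt field := by
  have hu : get_field_label field =
      (let field1 := if PySem.Str.isIn "__" field then
          String.ofList (PySem.Chars.splitOn field.toList ['_','_']).headI else field
       if PySem.Str.isIn "." field1 then
         PySem.Str.join " " ((PySem.Chars.splitOn field1.toList ['.']).map
           (fun p => getFieldLabelGoA field.toList.length (String.ofList p)))
       else pvTitle (PySem.Str.replace field1 "_" " ")) := rfl
  have halt : get_field_label_alt field =
      PySem.Str.join " " ((PySem.Chars.splitOn
          (String.ofList (PySem.Chars.splitOn field.toList ['_','_']).headI).toList ['.']).map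
        (fun p => pvTitle (PySem.Str.replace (String.ofList p) "_" " "))) := rfl
  rw [hu, halt]
  have hmem := headI_mem_splitOn field.toList ['_','_']
  have hinf : (PySem.Chars.splitOn field.toList ['_','_']).headI <:+: field.toList :=
    splitOn_mem_infix (by decide) hmem
  have hno2 : ¬ (['_','_'] <:+: (PySem.Chars.splitOn field.toList ['_','_']).headI) :=
    splitOn_no_sep (by decide) _ hmem
  have hfield1 : (if PySem.Str.isIn "__" field then
      String.ofList (PySem.Chars.splitOn field.toList ['_','_']).headI else field) =
      String.ofList (PySem.Chars.splitOn field.toList ['_','_']).headI := by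
    by_cases hc : PySem.Str.isIn "__" field = true
    · rw [if_pos hc]
    · rw [if_neg hc]
      have hni : ¬ (['_','_'] <:+: field.toList) := by
        have : PySem.Chars.isIn ['_','_'] field.toList = false := by
          simpa [PySem.Str.isIn] using (Bool.not_eq_true _).mp hc
        exact (PySem.Chars.isIn_eq_false_iff _ _).mp this
      rw [splitOn_of_not_infix hni]
      simp
  simp only [hfield1, String.toList_ofList]
  by_cases hdot : (['.'] <:+: (PySem.Chars.splitOn field.toList ['_','_']).headI)
  · have hdot' : PySem.Str.isIn "." (String.ofList (PySem.Chars.splitOn field.toList ['_','_']).headI) = true := by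
      simp only [PySem.Str.isIn, String.toList_ofList]
      exact (PySem.Chars.isIn_iff_infix _ _).mpr hdot
    rw [if_pos hdot']
    have hne : (PySem.Chars.splitOn field.toList ['_','_']).headI ≠ [] := by
      intro hnil
      rw [hnil] at hdot
      simp at hdot
    have hlen : 1 ≤ field.toList.length := by
      have h1 := hinf.length_le
      have h2 := List.length_pos_iff.mpr hne
      omega
    obtain ⟨m, hm⟩ : ∃ m, field.toList.length = m + 1 := ⟨field.toList.length - 1, by omega⟩
    rw [hm]
    refine congrArg (PySem.Str.join " ") ?_
    apply List.map_congr_left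
    intro p hp
    have hpne2 : ¬ (['_','_'] <:+: p) := fun hx =>
      hno2 (hx.trans (splitOn_mem_infix (by decide) hp))
    have hpne3 : ¬ (['.'] <:+: p) := splitOn_no_sep (by decide) p hp
    exact goA_base p m hpne2 hpne3
  · have hdot' : PySem.Str.isIn "." (String.ofList (PySem.Chars.splitOn field.toList ['_','_']).headI) = false := by
      simp only [PySem.Str.isIn, String.toList_ofList]
      exact (PySem.Chars.isIn_eq_false_iff _ _).mpr hdot
    rw [if_neg (by simp only [PySem.Str.isIn, String.toList_ofList, show (".".toList) = ['.'] from rfl]; exact fun hx => absurd ((PySem.Chars.isIn_iff_infix _ _).mp hx) hdot)]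
    rw [splitOn_of_not_infix hdot]
    simp [PySem.Str.join, PySem.Chars.join, List.intercalate]

-- ===== VERDICT (by name: the statement is the Claim_ definition above) =====
theorem get_field_label_spec : Claim_equal_get_field_label := by
  intro field _
  unfold Spec_get_field_label
  exact main_eq field
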